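-- pv_equiv track=rewrite | github.com/esther-soyoung/Coding-Challenge | Heap/ramen.py | solution
-- ===== SOURCE A (Python) =====
-- def solution(stock, dates, supplies, k):
--     cnt = 0
--     # Basecase
--     if stock >= k:
--         return cnt
--     # import before stock runs out
--     amt = 0
--     date = 0
--
--     z = list(zip(dates, supplies))
--
--
--     for i in range(len(dates)):
--         if dates[i] > stock:
--             break
--         else:
--             if supplies[i] >= amt:
--             	date = i
--             	amt = supplies[i]
--     dates.pop(date)
--     supplies.pop(date)
--     stock += amt
--     cnt += 1
--     cnt += solution(stock, dates, supplies, k)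
--     return cnt
-- ===== SOURCE B (Python) =====
-- # Iterative sorted-buffer greedy replacing A's recursive rescan-argmax-and-pop.
-- # Note: A mutates its dates/supplies arguments (pop); B leaves them untouched —
-- # the equivalence claimed is about the return value only.
-- def solution(stock, dates, supplies, k):
--     buf = []            # supplies already reachable, kept in descending order
--     i = 0
--     n = len(dates)
--     cnt = 0
--     while stock < k:
--         # push every newly reachable supply into the sorted buffer (each once)
--         while i < n and dates[i] <= stock:
--             s = supplies[i]
--             j = 0
--             while j < len(buf) and buf[j] >= s:
--                 j += 1
--             buf.insert(j, s)
--             i += 1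
--         stock += buf.pop(0)   # consume the largest reachable supply
--         cnt += 1
--     return cnt
-- ===== Notes on version B (the rewrite author's own statement) =====
-- stated objective: alternative
-- what changed: A recursively re-scans the date prefix for the largest reachable supply and pops it from the lists each round; B makes one left-to-right pass over the (sorted) dates, inserting each supply exactly once into a descending sorted buffer and taking the buffer head each round, iteratively with no recursion and no per-round rescans.
-- outside the precondition, e.g. on solution(1, [100, 0], [0, 5], 3): A returns 2, B raises IndexError; on solution(1, [0, 0], [-5, 3], 2): A returns 1, B returns 1; on solution(0, [0], [5, 7], 1): A returns 1, B returns 1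
import Mathlib
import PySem

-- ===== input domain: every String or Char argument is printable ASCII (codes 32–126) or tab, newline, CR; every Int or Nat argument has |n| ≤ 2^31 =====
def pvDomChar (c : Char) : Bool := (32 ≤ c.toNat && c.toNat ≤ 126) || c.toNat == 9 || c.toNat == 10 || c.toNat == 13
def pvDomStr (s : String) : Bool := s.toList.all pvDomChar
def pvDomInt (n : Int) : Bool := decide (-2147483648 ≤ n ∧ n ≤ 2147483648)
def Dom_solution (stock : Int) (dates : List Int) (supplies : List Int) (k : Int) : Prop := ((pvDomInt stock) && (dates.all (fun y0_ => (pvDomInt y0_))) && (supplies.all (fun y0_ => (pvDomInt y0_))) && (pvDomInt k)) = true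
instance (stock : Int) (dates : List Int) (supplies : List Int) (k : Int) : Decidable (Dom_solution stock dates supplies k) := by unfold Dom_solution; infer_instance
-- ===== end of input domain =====

-- B replaces A's recursive rescan-argmax-and-pop with one iterative pass keeping a descending
-- sorted buffer of reachable supplies (objective: alternative). A mutates its list arguments in
-- Python (pop); B does not — the equivalence proved here is about the return value only.

-- ===== PORT A =====
-- the loop 'for i in range(len(dates)): if dates[i] > stock: break; if supplies[i] >= amt: date, amt = i, supplies[i]'
-- walked structurally over both lists; i carries the Python index.
def aScan (stock : Int) : List Int → List Int → Int → Int → Int → Int × Int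
  | [], _, _, date, amt => (date, amt)
  | _ :: _, [], _, date, amt => (date, amt)   -- Python raises IndexError here (supplies exhausted); outside Pre_
  | d :: ds, s :: ss, i, date, amt =>
      if d > stock then (date, amt)
      else if s ≥ amt then aScan stock ds ss (i + 1) i s
      else aScan stock ds ss (i + 1) date amt

-- ('z = list(zip(dates, supplies))' in A is dead code with no effect: not ported)
def solution (stock : Int) (dates : List Int) (supplies : List Int) (k : Int) : Int :=
  if stock ≥ k then 0
  else
    match _h1 : PySem.List.pop? dates (aScan stock dates supplies 0 0 0).1,
          _h2 : PySem.List.pop? supplies (aScan stock dates supplies 0 0 0).1 with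
    | some (_, ds'), some (_, ss') =>
        1 + solution (stock + (aScan stock dates supplies 0 0 0).2) ds' ss' k
    | _, _ => 0   -- Python raises IndexError (pop from empty list); outside Pre_
termination_by dates.length
decreasing_by
  have := PySem.List.length_of_pop?_eq_some (xs := dates) _h1
  simp at this
  omega

-- ===== PORT B =====
-- 'j = 0; while j < len(buf) and buf[j] >= s: j += 1; buf.insert(j, s)' walked structurally over buf
def bInsert (buf : List Int) (s : Int) : List Int :=
  match buf with
  | [] => [s]
  | b :: t => if b ≥ s then b :: bInsert t s else s :: b :: t

theorem bInsert_length (buf : List Int) (s : Int) : (bInsert buf s).length = buf.length + 1 := by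
  induction buf with
  | nil => simp [bInsert]
  | cons b t ih => simp only [bInsert]; split <;> simp [ih]

-- the inner 'while i < n and dates[i] <= stock' push loop, consuming the unscanned suffix
def bPush (stock : Int) : List Int → List Int → List Int → List Int × List Int × List Int
  | d :: ds, s :: ss, buf =>
      if d ≤ stock then bPush stock ds ss (bInsert buf s) else (buf, d :: ds, s :: ss)
  | ds, ss, buf => (buf, ds, ss)   -- ds = [] stops the loop; ds ≠ [] = ss is Python's IndexError, outside Pre_

theorem bPush_length (stock : Int) :
    ∀ (ds ss buf : List Int),
      (bPush stock ds ss buf).1.length + (bPush stock ds ss buf).2.1.length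
        = buf.length + ds.length := by
  intro ds
  induction ds with
  | nil => intro ss buf; simp [bPush]
  | cons d ds ih =>
      intro ss buf
      cases ss with
      | nil => simp [bPush]
      | cons s ss =>
          simp only [bPush]
          split
          · rw [ih]; simp [bInsert_length]; omega
          · simp

-- the outer 'while stock < k' loop
def bLoop (stock k : Int) (buf ds ss : List Int) : Int :=
  if stock < k then
    match _h : bPush stock ds ss buf with
    | (b :: t, ds', ss') => 1 + bLoop (stock + b) k t ds' ss'
    | ([], ds', _) => Int.ofNat ds'.length
      -- Python raises IndexError here (pop from an empty buffer); outside Pre_ any value is fine —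
      -- ds'.length is chosen because it simplifies the equivalence proof.
  else 0
termination_by buf.length + ds.length
decreasing_by
  have h := bPush_length stock ds ss buf
  rw [_h] at h
  simp at h
  omega

def solution_alt (stock : Int) (dates : List Int) (supplies : List Int) (k : Int) : Int :=
  bLoop stock k [] dates supplies

-- ===== PRECONDITION & SPEC =====
-- Pre_ excludes (a) inputs on which Python A raises IndexError — the target is unreachable, so the
-- recursion empties the lists, which the last conjunct (reachability of k via in-order prefix sums)
-- rules out — and (b) inputs with unsorted dates, negative supplies, or unequal list lengths, where
-- A's break-at-first-late-date scan and unconditional pop give values (or exceptions) that are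
-- artefacts of its implementation and that a one-pass buffer greedy cannot share.
def Pre_solution (stock : Int) (dates : List Int) (supplies : List Int) (k : Int) : Prop :=
  k ≤ stock ∨    -- here A returns 0 before ever touching the lists, so no shape conditions apply
  (dates.length = supplies.length ∧
  dates.Pairwise (· ≤ ·) ∧
  (∀ s ∈ supplies, 0 ≤ s) ∧
  (∃ m ∈ List.range (dates.length + 1),
     k ≤ stock + (supplies.take m).sum ∧
     ∀ j ∈ List.range m, dates[j]! ≤ stock + (supplies.take j).sum))

instance (stock : Int) (dates : List Int) (supplies : List Int) (k : Int) :
    Decidable (Pre_solution stock dates supplies k) := by unfold Pre_solution; infer_instance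

def pvWitness_solution : Int × List Int × List Int × Int := (1, [0, 1, 2], [2, 3, 4], 9)

def Spec_solution (stock : Int) (dates : List Int) (supplies : List Int) (k : Int) (out : Int) : Prop := out = solution_alt stock dates supplies k
instance (stock : Int) (dates : List Int) (supplies : List Int) (k : Int) (out : Int) : Decidable (Spec_solution stock dates supplies k out) := by unfold Spec_solution; infer_instance

-- ===== CLAIM (what is proved, stated in full; the proofs are below) =====
def Claim_equal_solution : Prop := ∀ (stock : Int) (dates : List Int) (supplies : List Int) (k : Int), Dom_solution stock dates supplies k → Pre_solution stock dates supplies k → Spec_solution stock dates supplies k (solution stock dates supplies k)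

-- ===== LEMMAS AND PROOFS =====

-- the running-maximum fold of A's scan
def pvMaxF (l : List Int) (a : Int) : Int := l.foldl (fun a s => if s ≥ a then s else a) a

theorem pvMaxF_cons (x : Int) (l : List Int) (a : Int) :
    pvMaxF (x :: l) a = pvMaxF l (if x ≥ a then x else a) := rfl

theorem le_pvMaxF (l : List Int) (a : Int) : a ≤ pvMaxF l a := by
  induction l generalizing a with
  | nil => simp [pvMaxF]
  | cons x t ih =>
      rw [pvMaxF_cons]
      refine le_trans ?_ (ih _)
      split <;> omega

theorem mem_le_pvMaxF (l : List Int) (a x : Int) (hx : x ∈ l) : x ≤ pvMaxF l a := by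
  induction l generalizing a with
  | nil => simp at hx
  | cons y t ih =>
      rw [pvMaxF_cons]
      rcases List.mem_cons.1 hx with rfl | h
      · refine le_trans ?_ (le_pvMaxF _ _)
        split <;> omega
      · exact ih _ h

theorem pvMaxF_eq_or_mem (l : List Int) (a : Int) : pvMaxF l a = a ∨ pvMaxF l a ∈ l := by
  induction l generalizing a with
  | nil => left; rfl
  | cons y t ih =>
      rw [pvMaxF_cons]
      by_cases hy : y ≥ a
      · rw [if_pos hy]
        rcases ih y with h | h
        · rw [h]; right; exact List.mem_cons_self
        · right; exact List.mem_cons_of_mem _ h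
      · rw [if_neg hy]
        rcases ih a with h | h
        · left; exact h
        · right; exact List.mem_cons_of_mem _ h

-- bInsert facts
theorem bInsert_perm (buf : List Int) (s : Int) : (bInsert buf s).Perm (s :: buf) := by
  induction buf with
  | nil => simp [bInsert]
  | cons b t ih =>
      simp only [bInsert]
      split
      · exact (ih.cons b).trans (List.Perm.swap _ _ _)
      · exact List.Perm.refl _

theorem bInsert_sorted (buf : List Int) (s : Int) (h : buf.Pairwise (· ≥ ·)) :
    (bInsert buf s).Pairwise (· ≥ ·) := by
  induction buf with
  | nil => simp [bInsert]
  | cons b t ih =>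
      rw [List.pairwise_cons] at h
      simp only [bInsert]
      split
      · rename_i hbs
        rw [List.pairwise_cons]
        refine ⟨fun x hx => ?_, ih h.2⟩
        rcases List.mem_cons.1 ((bInsert_perm t s).mem_iff.1 hx) with rfl | hm
        · exact hbs
        · exact h.1 x hm
      · rename_i hbs
        rw [List.pairwise_cons]
        refine ⟨fun x hx => ?_, List.pairwise_cons.2 h⟩
        rcases List.mem_cons.1 hx with rfl | hm
        · omega
        · have := h.1 x hm; omega

theorem bFold_perm (u buf : List Int) : (u.foldl bInsert buf).Perm (buf ++ u) := by
  induction u generalizing buf with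
  | nil => simp
  | cons s t ih =>
      simp only [List.foldl_cons]
      exact (ih _).trans (((bInsert_perm buf s).append_right t).trans List.perm_middle.symm)

theorem bFold_sorted (u buf : List Int) (h : buf.Pairwise (· ≥ ·)) :
    (u.foldl bInsert buf).Pairwise (· ≥ ·) := by
  induction u generalizing buf with
  | nil => simpa
  | cons s t ih => exact ih _ (bInsert_sorted _ _ h)

-- bPush computes: fold the reachable run into the buffer, keep the rest
theorem bPush_spec (stock : Int) :
    ∀ (ds ss buf : List Int), ds.length = ss.length →
      bPush stock ds ss buf =
        ((ss.take (ds.takeWhile (fun d => decide (d ≤ stock))).length).foldl bInsert buf,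
         ds.dropWhile (fun d => decide (d ≤ stock)),
         ss.drop (ds.takeWhile (fun d => decide (d ≤ stock))).length) := by
  intro ds
  induction ds with
  | nil => intro ss buf h; simp at h; simp [bPush]
  | cons d ds ih =>
      intro ss buf h
      cases ss with
      | nil => simp at h
      | cons s ss =>
          simp only [bPush]
          split
          · rename_i hd
            rw [ih ss (bInsert buf s) (by simpa using h)]
            simp [hd]
          · rename_i hd
            simp [hd, List.dropWhile_cons]

-- takeWhile / dropWhile over an append whose first part satisfies the predicate
theorem takeWhile_append_all {p : Int → Bool} :
    ∀ (P S : List Int), (∀ x ∈ P, p x = true) →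
      (P ++ S).takeWhile p = P ++ S.takeWhile p := by
  intro P
  induction P with
  | nil => simp
  | cons a P ih =>
      intro S h
      simp only [List.cons_append, List.takeWhile_cons, h a (by simp)]
      rw [ih S (fun x hx => h x (by simp [hx]))]
      simp

-- characterisation of A's scan loop
theorem aScan_spec (stock : Int) :
    ∀ (ds ss : List Int) (i date amt : Int), ds.length = ss.length →
      ((aScan stock ds ss i date amt).2 =
        pvMaxF (ss.take (ds.takeWhile (fun d => decide (d ≤ stock))).length) amt) ∧
      ((aScan stock ds ss i date amt = (date, amt) ∧
          ∀ s ∈ ss.take (ds.takeWhile (fun d => decide (d ≤ stock))).length, ¬ s ≥ amt) ∨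
       (∃ j : Nat, j < (ds.takeWhile (fun d => decide (d ≤ stock))).length ∧
          (aScan stock ds ss i date amt).1 = i + (j : Int) ∧
          ss[j]? = some (aScan stock ds ss i date amt).2)) := by
  intro ds
  induction ds with
  | nil =>
      intro ss i date amt h
      simp [aScan, pvMaxF]
  | cons d ds ih =>
      intro ss i date amt h
      cases ss with
      | nil => simp at h
      | cons s ss =>
          have hlen : ds.length = ss.length := by simpa using h
          simp only [aScan]
          by_cases hd : d > stock
          · rw [if_pos hd]
            have : decide (d ≤ stock) = false := by simp; omega
            simp [this, pvMaxF]
          · rw [if_neg hd]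
            have hdec : decide (d ≤ stock) = true := by simp; omega
            simp only [List.takeWhile_cons, hdec, if_true, List.length_cons,
              List.take_succ_cons, pvMaxF_cons]
            by_cases hs : s ≥ amt
            · rw [if_pos hs]
              obtain ⟨ih1, ih2⟩ := ih ss (i + 1) i s hlen
              refine ⟨by rw [ih1, if_pos hs], ?_⟩
              rcases ih2 with ⟨heq, -⟩ | ⟨j, hj, hj1, hj2⟩
              · right
                refine ⟨0, by omega, ?_, ?_⟩
                · rw [heq]; simp
                · rw [heq]; simp
              · right
                refine ⟨j + 1, by omega, ?_, ?_⟩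
                · rw [hj1]; push_cast; ring
                · simpa using hj2
            · rw [if_neg hs]
              obtain ⟨ih1, ih2⟩ := ih ss (i + 1) date amt hlen
              refine ⟨by rw [ih1, if_neg hs], ?_⟩
              rcases ih2 with ⟨heq, hall⟩ | ⟨j, hj, hj1, hj2⟩
              · left
                refine ⟨heq, fun x hx => ?_⟩
                rcases List.mem_cons.1 hx with rfl | hm
                · exact hs
                · exact hall x hm
              · right
                refine ⟨j + 1, by omega, ?_, ?_⟩
                · rw [hj1]; push_cast; ring
                · simpa using hj2

-- the head of a descending sorted list permuting a nonnegative list is its running maximum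
theorem head_sorted_perm (b : Int) (t l : List Int)
    (hs : (b :: t).Pairwise (· ≥ ·)) (hp : (b :: t).Perm l) (hn : ∀ x ∈ l, 0 ≤ x) :
    b = pvMaxF l 0 := by
  have hbl : b ∈ l := hp.mem_iff.1 List.mem_cons_self
  have h1 : b ≤ pvMaxF l 0 := mem_le_pvMaxF l 0 b hbl
  have h2 : pvMaxF l 0 ≤ b := by
    rcases pvMaxF_eq_or_mem l 0 with h | h
    · rw [h]; exact hn b hbl
    · have hm : pvMaxF l 0 ∈ b :: t := hp.mem_iff.2 h
      rcases List.mem_cons.1 hm with h' | h'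
      · omega
      · exact (List.pairwise_cons.1 hs).1 _ h'
  omega

-- an element cons'ed back onto its eraseIdx is a permutation of the original list
theorem cons_eraseIdx_perm : ∀ (l : List Int) (j : Nat) (h : j < l.length),
    (l[j] :: l.eraseIdx j).Perm l := by
  intro l
  induction l with
  | nil => intro j h; simp at h
  | cons x t ih =>
      intro j h
      cases j with
      | zero => simp
      | succ j =>
          simp only [List.getElem_cons_succ, List.eraseIdx_cons_succ]
          exact (List.Perm.swap _ _ _).trans ((ih j (by simpa using h)).cons x)

-- A on a stuck state (all dates in the future) pops heads until the lists are empty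
theorem stuckA : ∀ (Sd Ss : List Int) (stock k : Int), stock < k →
    Sd.length = Ss.length → (∀ d ∈ Sd, stock < d) →
    solution stock Sd Ss k = Int.ofNat Sd.length := by
  intro Sd
  induction Sd with
  | nil =>
      intro Ss stock k hk hlen _
      have : Ss = [] := by simpa using hlen.symm
      subst this
      rw [solution]
      rw [if_neg (by omega)]
      simp [aScan, PySem.List.pop?, PySem.List.pyIdx?]
  | cons d Sd ih =>
      intro Ss stock k hk hlen hall
      cases Ss with
      | nil => simp at hlen
      | cons s Ss =>
          have hd : d > stock := hall d List.mem_cons_self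
          rw [solution]
          rw [if_neg (by omega)]
          have hscan : aScan stock (d :: Sd) (s :: Ss) 0 0 0 = (0, 0) := by
            simp only [aScan]; rw [if_pos hd]
          rw [hscan]
          split
          · rename_i fst ds' fst1 ss' h1 h2
            rw [PySem.List.pop?_zero_cons] at h1 h2
            cases h1; cases h2
            show 1 + solution (stock + 0) Sd Ss k = _
            rw [add_zero]
            rw [ih Ss stock k hk (by simpa using hlen)
              (fun x hx => hall x (List.mem_cons_of_mem _ hx))]
            simp only [List.length_cons, Int.ofNat_eq_natCast]
            push_cast
            ring
          · rename_i hcontra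
            exact (hcontra d Sd s Ss (by rw [show ((0:Int),(0:Int)).1 = (0:Int) from rfl]; exact PySem.List.pop?_zero_cons d Sd)
              (by rw [show ((0:Int),(0:Int)).1 = (0:Int) from rfl]; exact PySem.List.pop?_zero_cons s Ss)).elim

-- main simulation: A on (zone ++ suffix) equals B's buffered loop
theorem pv_main : ∀ (N : Nat) (stock k : Int) (Pd Ps Sd Ss buf : List Int),
    Pd.length + Sd.length ≤ N →
    Pd.length = Ps.length → Sd.length = Ss.length →
    (∀ d ∈ Pd, d ≤ stock) →
    (∀ s ∈ Ps, 0 ≤ s) → (∀ s ∈ Ss, 0 ≤ s) →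
    Sd.Pairwise (· ≤ ·) →
    buf.Pairwise (· ≥ ·) → buf.Perm Ps →
    solution stock (Pd ++ Sd) (Ps ++ Ss) k = bLoop stock k buf Sd Ss := by
  intro N
  induction N with
  | zero =>
      intro stock k Pd Ps Sd Ss buf hN hlp hls hPd hPs hSs hsort hbs hbp
      have hPd0 : Pd = [] := List.eq_nil_of_length_eq_zero (by omega)
      have hSd0 : Sd = [] := List.eq_nil_of_length_eq_zero (by omega)
      subst hPd0 hSd0
      have hPs0 : Ps = [] := List.eq_nil_of_length_eq_zero (by omega)
      have hSs0 : Ss = [] := List.eq_nil_of_length_eq_zero (by omega)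
      subst hPs0 hSs0
      have hbuf0 : buf = [] := hbp.eq_nil
      subst hbuf0
      simp only [List.append_nil]
      by_cases hk : stock ≥ k
      · rw [solution, if_pos hk, bLoop, if_neg (by omega)]
      · rw [stuckA [] [] stock k (by omega) rfl (by simp), bLoop, if_pos (by omega)]
        simp [bPush]
  | succ n ih =>
      intro stock k Pd Ps Sd Ss buf hN hlp hls hPd hPs hSs hsort hbs hbp
      by_cases hk : stock ≥ k
      · rw [solution, if_pos hk, bLoop, if_neg (by omega)]
      · -- stock < k
        have hPp : ∀ x ∈ Pd, (fun d : Int => decide (d ≤ stock)) x = true :=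
          fun x hx => by simpa using hPd x hx
        have htw : (Pd ++ Sd).takeWhile (fun d : Int => decide (d ≤ stock))
            = Pd ++ Sd.takeWhile (fun d : Int => decide (d ≤ stock)) :=
          takeWhile_append_all _ _ hPp
        set R := Sd.takeWhile (fun d : Int => decide (d ≤ stock)) with hR
        set Sd' := Sd.dropWhile (fun d : Int => decide (d ≤ stock)) with hSd'
        set r := R.length with hr
        have hrle : r ≤ Sd.length := by rw [hr, hR]; exact (List.takeWhile_sublist _).length_le
        set U := Ss.take r with hU
        set Ss' := Ss.drop r with hSs'
        have hUlen : U.length = r := by rw [hU]; simp; omega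
        have hSdsplit : Sd = R ++ Sd' := (Sd.takeWhile_append_dropWhile).symm
        have hSssplit : Ss = U ++ Ss' := (List.take_append_drop r Ss).symm
        have hlenfull : (Pd ++ Sd).length = (Ps ++ Ss).length := by simp; omega
        obtain ⟨hscan2, hscanD⟩ := aScan_spec stock (Pd ++ Sd) (Ps ++ Ss) 0 0 0 hlenfull
        have hcutlen : ((Pd ++ Sd).takeWhile (fun d : Int => decide (d ≤ stock))).length
            = Pd.length + r := by rw [htw]; simp [hr]
        have hufull : (Ps ++ Ss).take ((Pd ++ Sd).takeWhile (fun d : Int => decide (d ≤ stock))).length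
            = Ps ++ U := by
          rw [hcutlen, hlp, hU, List.take_append]
          congr 1
          · exact List.take_of_length_le (by omega)
          · congr 1
            omega
        have hznn : ∀ x ∈ Ps ++ U, (0:Int) ≤ x := by
          intro x hx
          rcases List.mem_append.1 hx with h | h
          · exact hPs x h
          · exact hSs x (List.mem_of_mem_take h)
        have hpush := bPush_spec stock Sd Ss buf hls
        have hbperm : (U.foldl bInsert buf).Perm (Ps ++ U) :=
          (bFold_perm U buf).trans (hbp.append_right U)
        have hbsort2 : (U.foldl bInsert buf).Pairwise (· ≥ ·) := bFold_sorted U buf hbs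
        by_cases hzero : Pd.length + r = 0
        · -- stuck: nothing reachable
          have hPd0 : Pd = [] := List.eq_nil_of_length_eq_zero (by omega)
          have hr0 : r = 0 := by omega
          subst hPd0
          have hPs0 : Ps = [] := List.eq_nil_of_length_eq_zero (by omega)
          subst hPs0
          have hbuf0 : buf = [] := hbp.eq_nil
          subst hbuf0
          have hU0 : U = [] := List.eq_nil_of_length_eq_zero (by omega)
          have hall : ∀ d ∈ Sd, stock < d := by
            intro d hd
            cases hSd : Sd with
            | nil => rw [hSd] at hd; simp at hd
            | cons d0 t =>
                have hpd0 : ¬ (d0 ≤ stock) := by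
                  have : R.length = 0 := by omega
                  rw [hR, hSd] at this
                  rw [List.takeWhile_cons] at this
                  by_contra hc
                  simp [hc] at this
                rw [hSd] at hd hsort
                rcases List.mem_cons.1 hd with rfl | hm
                · omega
                · have := (List.pairwise_cons.1 hsort).1 d hm; omega
          have hR0 : Sd.takeWhile (fun d : Int => decide (d ≤ stock)) = [] := by
            rw [← hR]; exact List.eq_nil_of_length_eq_zero (by omega)
          have hdw0 : Sd.dropWhile (fun d : Int => decide (d ≤ stock)) = Sd := by
            rw [← hSd']
            conv_rhs => rw [hSdsplit]
            have hRnil : R = [] := List.eq_nil_of_length_eq_zero (by omega)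
            rw [hRnil, List.nil_append]
          rw [show ([] : List Int) ++ Sd = Sd from rfl, show ([] : List Int) ++ Ss = Ss from rfl]
          rw [stuckA Sd Ss stock k (by omega) hls hall, bLoop, if_pos (by omega), hpush]
          rw [← hR, ← hSd']
          have hRnil : R = [] := List.eq_nil_of_length_eq_zero (by omega)
          have hSdeq : Sd' = Sd := by rw [← hdw0, hSd']
          rw [hRnil, hSdeq]
          simp
        · -- at least one reachable supply
          have hzne : (Ps ++ U).length ≠ 0 := by rw [List.length_append, hUlen]; omega
          rcases hscanD with ⟨-, hall⟩ | ⟨j, hj, hj1, hj2⟩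
          · exfalso
            rw [hufull] at hall
            cases hz : Ps ++ U with
            | nil => rw [hz] at hzne; simp at hzne
            | cons z t =>
                have hzmem : z ∈ Ps ++ U := by rw [hz]; exact List.mem_cons_self
                exact hall z hzmem (hznn z hzmem)
          · rw [hufull] at hscan2
            set amt := (aScan stock (Pd ++ Sd) (Ps ++ Ss) 0 0 0).2 with hamt
            have hamtnn : (0:Int) ≤ amt := by rw [hscan2]; exact le_pvMaxF _ _
            rw [zero_add] at hj1
            have hjlt : j < (Pd ++ Sd).length :=
              lt_of_lt_of_le hj (List.Sublist.length_le (List.takeWhile_sublist _))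
            have hjlt2 : j < (Ps ++ Ss).length := by rw [← hlenfull]; exact hjlt
            have hp1 : PySem.List.pop? (Pd ++ Sd) (aScan stock (Pd ++ Sd) (Ps ++ Ss) 0 0 0).1
                = some ((Pd ++ Sd)[j], (Pd ++ Sd).eraseIdx j) := by
              rw [hj1]; exact PySem.List.pop?_natCast (xs := Pd ++ Sd) (n := j) hjlt
            have hp2 : PySem.List.pop? (Ps ++ Ss) (aScan stock (Pd ++ Sd) (Ps ++ Ss) 0 0 0).1
                = some ((Ps ++ Ss)[j], (Ps ++ Ss).eraseIdx j) := by
              rw [hj1]; exact PySem.List.pop?_natCast (xs := Ps ++ Ss) (n := j) hjlt2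
            -- reduce A one step
            rw [solution, if_neg (by omega)]
            rw [hcutlen] at hj
            have hjzone : j < (Pd ++ R).length := by simp; omega
            have hjzone2 : j < (Ps ++ U).length := by simp [hUlen]; omega
            -- the popped supply is amt
            have hgetamt : (Ps ++ U)[j]'hjzone2 = amt := by
              have h1 : (Ps ++ Ss)[j]? = some amt := hj2
              rw [hSssplit, ← List.append_assoc] at h1
              rw [List.getElem?_append_left hjzone2] at h1
              have := List.getElem?_eq_getElem hjzone2
              rw [this] at h1
              exact Option.some.inj h1
            -- B one step
            rw [bLoop, if_pos (by omega)]
            -- name the buffer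
            cases hbuf : U.foldl bInsert buf with
            | nil =>
                exfalso
                have := hbperm.length_eq
                rw [hbuf] at this
                simp at this
                omega
            | cons b t =>
                rw [hbuf] at hbperm hbsort2
                have hbamt : b = amt := by
                  rw [hscan2]
                  exact head_sorted_perm b t (Ps ++ U) hbsort2 hbperm hznn
                -- decompositions of the erased lists
                have hdatesE : (Pd ++ Sd).eraseIdx j = (Pd ++ R).eraseIdx j ++ Sd' := by
                  conv_lhs => rw [hSdsplit, ← List.append_assoc]
                  exact List.eraseIdx_append_of_lt_length hjzone _
                have hsupE : (Ps ++ Ss).eraseIdx j = (Ps ++ U).eraseIdx j ++ Ss' := by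
                  conv_lhs => rw [hSssplit, ← List.append_assoc]
                  exact List.eraseIdx_append_of_lt_length hjzone2 _
                -- permutation for the new buffer
                have htperm : t.Perm ((Ps ++ U).eraseIdx j) := by
                  have h1 : (((Ps ++ U)[j]'hjzone2) :: (Ps ++ U).eraseIdx j).Perm (Ps ++ U) :=
                    cons_eraseIdx_perm (Ps ++ U) j hjzone2
                  rw [hgetamt, ← hbamt] at h1
                  exact (hbperm.trans h1.symm).cons_inv
                -- apply the induction hypothesis
                have hIH := ih (stock + amt) k ((Pd ++ R).eraseIdx j) ((Ps ++ U).eraseIdx j)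
                  Sd' Ss' t
                  (by
                    have h1 := List.length_eraseIdx_of_lt hjzone
                    have h2 : Sd'.length = Sd.length - r := by
                      have := congrArg List.length hSdsplit
                      simp at this; omega
                    simp at h1 ⊢
                    omega)
                  (by
                    have h1 := List.length_eraseIdx_of_lt hjzone
                    have h2 := List.length_eraseIdx_of_lt hjzone2
                    simp at h1 h2 ⊢
                    omega)
                  (by
                    have h1 := congrArg List.length hSdsplit
                    have h2 := congrArg List.length hSssplit
                    simp [hUlen] at h1 h2
                    omega)
                  (by
                    intro x hx
                    have hx' : x ∈ Pd ++ R := ((Pd ++ R).eraseIdx_sublist j).mem hx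
                    have : x ≤ stock := by
                      rcases List.mem_append.1 hx' with h | h
                      · exact hPd x h
                      · have := List.mem_takeWhile_imp (hR ▸ h)
                        simpa using this
                    omega)
                  (by
                    intro x hx
                    exact hznn x (((Ps ++ U).eraseIdx_sublist j).mem hx))
                  (by
                    intro x hx
                    exact hSs x (List.mem_of_mem_drop (hSs' ▸ hx)))
                  (hsort.sublist (hSd' ▸ Sd.dropWhile_sublist _))
                  ((List.pairwise_cons.1 hbsort2).2)
                  htperm
                -- assemble
                have hfin : 1 + solution (stock + amt) ((Pd ++ Sd).eraseIdx j)
                    ((Ps ++ Ss).eraseIdx j) k = 1 + bLoop (stock + b) k t Sd' Ss' := by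
                  rw [hdatesE, hsupE, hIH, hbamt]
                -- reduce A's match using hp1/hp2
                rw [hpush]
                rw [hbuf]
                split
                · rename_i fst ds2 fst1 ss2 h1 h2
                  rw [hp1] at h1
                  rw [hp2] at h2
                  cases h1; cases h2
                  rw [← hamt]
                  exact hfin
                · rename_i hcontra
                  exact (hcontra _ _ _ _ hp1 hp2).elim

-- ===== VERDICT (by name: the statement is the Claim_ definition above) =====
theorem solution_spec : Claim_equal_solution := by
  intro stock dates supplies k _hDom hPre
  unfold Spec_solution solution_alt
  rcases hPre with hk | ⟨hlen, hsort, hnn, -⟩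
  · rw [solution, if_pos (by omega), bLoop, if_neg (by omega)]
  · have := pv_main dates.length stock k [] [] dates supplies []
      (by simp) (by simp) hlen (by simp) (by simp) hnn hsort (by simp) (by simp)
    simpa using this
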